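-- pv_equiv track=rewrite | github.com/Giovannibriglia/deep_forked | lib/rl_handler/src/data.py | _clip_targets_and_redistribute
-- ===== SOURCE A (Python) =====
-- from typing import Any, Callable, Dict, List, Optional, Sequence, Tuple
--
-- def _clip_targets_and_redistribute(
--     target_by_size: Dict[int, int],
--     cap_by_size: Dict[int, int],
-- ) -> Dict[int, int]:
--     sizes = sorted(int(s) for s in target_by_size.keys())
--     out = {
--         int(size): int(min(int(target_by_size.get(int(size), 0)), int(cap_by_size.get(int(size), 0))))
--         for size in sizes
--     }
--     target_total = int(sum(int(target_by_size.get(int(size), 0)) for size in sizes))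
--     current_total = int(sum(out.values()))
--     remaining = int(max(0, target_total - current_total))
--     while remaining > 0:
--         expandable = [
--             int(size)
--             for size in sizes
--             if int(out.get(int(size), 0)) < int(cap_by_size.get(int(size), 0))
--         ]
--         if not expandable:
--             break
--         for size in expandable:
--             if remaining <= 0:
--                 break
--             out[int(size)] = int(out.get(int(size), 0) + 1)
--             remaining -= 1
--     return out
-- ===== SOURCE B (Python) =====
-- def _clip_targets_and_redistribute(target_by_size, cap_by_size):
--     # Water-filling in bulk rounds: instead of handing out one unit per item per
--     # pass (O(remaining) passes), give every expandable item k units at once,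
--     # where k is limited by the minimum headroom and by the budget per item.
--     sizes = sorted(target_by_size.keys())
--     state = []  # (value, cap) per size, in sorted-size order
--     r = 0       # leftover to redistribute
--     for s in sizes:
--         t = target_by_size.get(s, 0)
--         c = cap_by_size.get(s, 0)
--         v = min(t, c)
--         state.append((v, c))
--         r += t - v
--     while r > 0:
--         nexp = sum(1 for v, c in state if v < c)
--         if nexp == 0:
--             break
--         m = min(c - v for v, c in state if v < c)
--         k = min(m, r // nexp)
--         if k >= 1:
--             state = [(v + k, c) if v < c else (v, c) for v, c in state]
--             r -= k * nexp
--         else: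
--             state = _bump_first(state, r)
--             r = 0
--     return {s: v for s, (v, c) in zip(sizes, state)}
--
--
-- def _bump_first(state, r):
--     out = []
--     for v, c in state:
--         if r > 0 and v < c:
--             out.append((v + 1, c))
--             r -= 1
--         else:
--             out.append((v, c))
--     return out
-- ===== Notes on version B (the rewrite author's own statement) =====
-- stated objective: faster
-- what changed: A hands out one unit per expandable size per pass (O(remaining) passes over the dict); B water-fills in bulk rounds: it gives every expandable size k units at once, k bounded by the minimum headroom and the per-item budget, so each round either saturates a size or reduces the leftover below the expandable count, giving O(n) rounds.
import Mathlib
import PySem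

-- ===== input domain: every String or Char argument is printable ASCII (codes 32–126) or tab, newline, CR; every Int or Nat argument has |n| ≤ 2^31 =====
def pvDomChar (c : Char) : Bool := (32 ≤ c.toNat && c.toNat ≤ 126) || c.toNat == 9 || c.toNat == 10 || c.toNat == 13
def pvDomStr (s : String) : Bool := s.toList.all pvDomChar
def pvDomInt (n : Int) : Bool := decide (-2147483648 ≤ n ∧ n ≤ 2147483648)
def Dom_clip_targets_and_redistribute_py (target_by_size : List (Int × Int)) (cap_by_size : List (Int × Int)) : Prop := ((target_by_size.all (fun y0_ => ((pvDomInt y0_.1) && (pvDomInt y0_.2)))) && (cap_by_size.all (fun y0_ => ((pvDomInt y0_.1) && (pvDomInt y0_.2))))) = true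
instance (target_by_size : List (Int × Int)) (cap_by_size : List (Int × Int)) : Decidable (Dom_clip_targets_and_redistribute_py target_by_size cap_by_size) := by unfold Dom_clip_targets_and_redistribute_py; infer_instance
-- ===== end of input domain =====

-- ===== PORT A =====
-- B replaces A's one-unit-per-pass redistribution loop with bulk water-filling rounds (objective: faster).

-- termination helper for the while loop: one pass never increases `remaining`
def pvAPass (expandable : List Int) (out : PySem.Dict Int Int) (remaining : Int) :
    PySem.Dict Int Int × Int :=
  match expandable with
  | [] => (out, remaining)
  | s :: ss =>
    if remaining ≤ 0 then (out, remaining)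
    else pvAPass ss (out.insert s (out.getD s 0 + 1)) (remaining - 1)

theorem pvAPass_snd_le (expandable : List Int) (out : PySem.Dict Int Int) (r : Int) :
    (pvAPass expandable out r).2 ≤ r := by
  induction expandable generalizing out r with
  | nil => simp [pvAPass]
  | cons s ss ih =>
    simp only [pvAPass]
    split
    · simp
    · exact le_trans (ih _ _) (by omega)

theorem pvAPass_snd_lt (expandable : List Int) (out : PySem.Dict Int Int) (r : Int)
    (hx : expandable ≠ []) (hr : 0 < r) : (pvAPass expandable out r).2 < r := by
  cases expandable with
  | nil => exact absurd rfl hx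
  | cons s ss =>
    simp only [pvAPass, if_neg (by omega : ¬ r ≤ 0)]
    exact lt_of_le_of_lt (pvAPass_snd_le _ _ _) (by omega)

-- the expandable list comprehension of A
def pvExpandable (sizes : List Int) (cap out : PySem.Dict Int Int) : List Int :=
  sizes.filter (fun s => out.getD s 0 < cap.getD s 0)

-- the `while remaining > 0` loop of A
def pvALoop (sizes : List Int) (cap : PySem.Dict Int Int) (out : PySem.Dict Int Int)
    (remaining : Int) : PySem.Dict Int Int :=
  if h0 : 0 < remaining then
    if hx : pvExpandable sizes cap out = [] then out
    else
      pvALoop sizes cap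
        (pvAPass (pvExpandable sizes cap out) out remaining).1
        (pvAPass (pvExpandable sizes cap out) out remaining).2
  else out
termination_by remaining.toNat
decreasing_by
  have h1 := pvAPass_snd_lt (pvExpandable sizes cap out) out remaining hx h0
  omega

def clip_targets_and_redistribute_py (target_by_size : List (Int × Int))
    (cap_by_size : List (Int × Int)) : List (Int × Int) :=
  let tD := PySem.Dict.ofList target_by_size
  let cD := PySem.Dict.ofList cap_by_size
  let sizes := PySem.List.sorted tD.keys (fun s => s) false
  -- dict comprehension {size: min(t, c) for size in sizes}
  let out := sizes.foldl (fun d s => d.insert s (min (tD.getD s 0) (cD.getD s 0))) PySem.Dict.empty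
  let target_total := (sizes.map (fun s => tD.getD s 0)).sum
  let current_total := out.values.sum
  let remaining := max 0 (target_total - current_total)
  (pvALoop sizes cD out remaining).items

-- ===== PORT B =====
-- _bump_first of Source B: +1 to the first r expandable entries
def pvBumpFirst : List (Int × Int) → Int → List (Int × Int)
  | [], _ => []
  | (v, c) :: rest, r =>
    if 0 < r ∧ v < c then (v + 1, c) :: pvBumpFirst rest (r - 1)
    else (v, c) :: pvBumpFirst rest r

-- the Python locals of one bulk round: nexp = sum(1 for ...) (a 0/1-sum is the filtered count),
-- m = min(...) over the guarded-nonempty generator (PySem.List.minD; default never used), k = min(m, r // nexp)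
def pvNexp (state : List (Int × Int)) : Int :=
  ((state.filter (fun p => p.1 < p.2)).length : Int)

def pvM (state : List (Int × Int)) : Int :=
  PySem.List.minD ((state.filter (fun p => p.1 < p.2)).map (fun p => p.2 - p.1)) (fun x => x) 0

def pvK (state : List (Int × Int)) (r : Int) : Int :=
  min (pvM state) (PySem.Int.floordiv r (pvNexp state))

-- the bulk `while r > 0` loop of Source B
def pvBLoop (state : List (Int × Int)) (r : Int) : List (Int × Int) :=
  if h0 : 0 < r then
    if hn : pvNexp state = 0 then state
    else
      if hk : 1 ≤ pvK state r then
        pvBLoop (state.map (fun p => if p.1 < p.2 then (p.1 + pvK state r, p.2) else p))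
          (r - pvK state r * pvNexp state)
      else
        pvBLoop (pvBumpFirst state r) 0
  else state
termination_by r.toNat
decreasing_by
  · have hE : 0 < pvNexp state := by
      have : 0 ≤ pvNexp state := Int.natCast_nonneg _
      omega
    have : (1 : Int) * 1 ≤ pvK state r * pvNexp state :=
      mul_le_mul hk hE (by omega) (by omega)
    omega
  · omega

def clip_targets_and_redistribute_py_alt (target_by_size : List (Int × Int))
    (cap_by_size : List (Int × Int)) : List (Int × Int) :=
  let tD := PySem.Dict.ofList target_by_size
  let cD := PySem.Dict.ofList cap_by_size
  let sizes := PySem.List.sorted tD.keys (fun s => s) false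
  -- for s in sizes: state.append((min(t,c), c)); r += t - min(t,c)
  let init := sizes.foldl (fun (acc : List (Int × Int) × Int) s =>
      let t := tD.getD s 0
      let c := cD.getD s 0
      let v := min t c
      (acc.1 ++ [(v, c)], acc.2 + (t - v))) ([], 0)
  let final := pvBLoop init.1 init.2
  -- dict comprehension over the distinct keys `sizes`, in order
  (sizes.zip final).map (fun p => (p.1, p.2.1))

-- ===== PRECONDITION & SPEC =====
def Spec_clip_targets_and_redistribute_py (target_by_size : List (Int × Int)) (cap_by_size : List (Int × Int)) (out : List (Int × Int)) : Prop := out = clip_targets_and_redistribute_py_alt target_by_size cap_by_size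
instance (target_by_size : List (Int × Int)) (cap_by_size : List (Int × Int)) (out : List (Int × Int)) : Decidable (Spec_clip_targets_and_redistribute_py target_by_size cap_by_size out) := by unfold Spec_clip_targets_and_redistribute_py; infer_instance

-- ===== CLAIM (what is proved, stated in full; the proofs are below) =====
def Claim_equal_clip_targets_and_redistribute_py : Prop := ∀ (target_by_size : List (Int × Int)) (cap_by_size : List (Int × Int)), Dom_clip_targets_and_redistribute_py target_by_size cap_by_size → Spec_clip_targets_and_redistribute_py target_by_size cap_by_size (clip_targets_and_redistribute_py target_by_size cap_by_size)

-- ===== LEMMAS AND PROOFS =====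

-- list-level single pass with budget (A's inner for-loop, seen on the value/cap list)
def lPass : List (Int × Int) → Int → List (Int × Int) × Int
  | [], r => ([], r)
  | (v, c) :: rest, r =>
    if 0 < r ∧ v < c then
      ((v + 1, c) :: (lPass rest (r - 1)).1, (lPass rest (r - 1)).2)
    else
      ((v, c) :: (lPass rest r).1, (lPass rest r).2)

theorem lPass_snd (st : List (Int × Int)) (r : Int) :
    (lPass st r).2
      = r - min (max r 0) (((st.filter (fun p => decide (p.1 < p.2))).length : Int)) := by
  induction st generalizing r with
  | nil => simp [lPass]
  | cons p rest ih =>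
    obtain ⟨v, c⟩ := p
    by_cases hvc : v < c
    · by_cases hr : 0 < r
      · simp only [lPass, if_pos (show 0 < r ∧ v < c from ⟨hr, hvc⟩), ih]
        simp only [List.filter_cons, decide_eq_true_eq]
        rw [if_pos hvc]
        simp only [List.length_cons]
        push_cast
        omega
      · simp only [lPass, if_neg (show ¬ (0 < r ∧ v < c) by tauto), ih]
        simp only [List.filter_cons, decide_eq_true_eq]
        rw [if_pos hvc]
        simp only [List.length_cons]
        push_cast
        omega
    · simp only [lPass, if_neg (show ¬ (0 < r ∧ v < c) by tauto), ih]
      simp only [List.filter_cons, decide_eq_true_eq]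
      rw [if_neg hvc]

def lLoop (st : List (Int × Int)) (r : Int) : List (Int × Int) :=
  if h0 : 0 < r then
    if hn : (st.filter (fun p => decide (p.1 < p.2))).length = 0 then st
    else lLoop (lPass st r).1 (lPass st r).2
  else st
termination_by r.toNat
decreasing_by
  try simp only [List.unattach_filter] at *
  have h := lPass_snd st r
  omega

-- step lemmas for the three while-loops (their definitional unfoldings)
theorem lLoop_neg (st : List (Int × Int)) (r : Int) (h0 : ¬ 0 < r) : lLoop st r = st := by
  unfold lLoop
  try simp only [List.unattach_filter]
  rw [dif_neg h0]

theorem lLoop_done (st : List (Int × Int)) (r : Int) (h0 : 0 < r)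
    (hn : (st.filter (fun p => decide (p.1 < p.2))).length = 0) : lLoop st r = st := by
  unfold lLoop
  try simp only [List.unattach_filter]
  rw [dif_pos h0, dif_pos hn]

theorem lLoop_step (st : List (Int × Int)) (r : Int) (h0 : 0 < r)
    (hn : ¬ (st.filter (fun p => decide (p.1 < p.2))).length = 0) :
    lLoop st r = lLoop (lPass st r).1 (lPass st r).2 := by
  conv_lhs => unfold lLoop
  rw [dif_pos h0, dif_neg hn]

theorem pvALoop_neg (sizes : List Int) (cap out : PySem.Dict Int Int) (r : Int)
    (h0 : ¬ 0 < r) : pvALoop sizes cap out r = out := by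
  unfold pvALoop
  rw [dif_neg h0]

theorem pvALoop_done (sizes : List Int) (cap out : PySem.Dict Int Int) (r : Int)
    (h0 : 0 < r) (hx : pvExpandable sizes cap out = []) :
    pvALoop sizes cap out r = out := by
  unfold pvALoop
  rw [dif_pos h0, dif_pos hx]

theorem pvALoop_step (sizes : List Int) (cap out : PySem.Dict Int Int) (r : Int)
    (h0 : 0 < r) (hx : ¬ pvExpandable sizes cap out = []) :
    pvALoop sizes cap out r = pvALoop sizes cap
      (pvAPass (pvExpandable sizes cap out) out r).1
      (pvAPass (pvExpandable sizes cap out) out r).2 := by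
  conv_lhs => unfold pvALoop
  rw [dif_pos h0, dif_neg hx]

theorem pvBLoop_neg (st : List (Int × Int)) (r : Int) (h0 : ¬ 0 < r) : pvBLoop st r = st := by
  unfold pvBLoop
  rw [dif_neg h0]

theorem pvBLoop_done (st : List (Int × Int)) (r : Int) (h0 : 0 < r) (hn : pvNexp st = 0) :
    pvBLoop st r = st := by
  unfold pvBLoop
  rw [dif_pos h0, dif_pos hn]

theorem pvBLoop_bulk (st : List (Int × Int)) (r : Int) (h0 : 0 < r) (hn : ¬ pvNexp st = 0)
    (hk : 1 ≤ pvK st r) :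
    pvBLoop st r = pvBLoop (st.map (fun p => if p.1 < p.2 then (p.1 + pvK st r, p.2) else p))
      (r - pvK st r * pvNexp st) := by
  conv_lhs => unfold pvBLoop
  rw [dif_pos h0, dif_neg hn, dif_pos hk]

theorem pvBLoop_partial (st : List (Int × Int)) (r : Int) (h0 : 0 < r) (hn : ¬ pvNexp st = 0)
    (hk : ¬ 1 ≤ pvK st r) :
    pvBLoop st r = pvBLoop (pvBumpFirst st r) 0 := by
  conv_lhs => unfold pvBLoop
  rw [dif_pos h0, dif_neg hn, dif_neg hk]

-- basic facts about lPass
theorem lPass_nonpos (st : List (Int × Int)) (r : Int) (hr : r ≤ 0) : lPass st r = (st, r) := by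
  induction st generalizing r with
  | nil => rfl
  | cons p rest ih =>
    obtain ⟨v, c⟩ := p
    simp only [lPass, if_neg (show ¬ (0 < r ∧ v < c) by omega), ih r hr]

theorem lPass_fst_eq_bump (st : List (Int × Int)) (r : Int) :
    (lPass st r).1 = pvBumpFirst st r := by
  induction st generalizing r with
  | nil => rfl
  | cons p rest ih =>
    obtain ⟨v, c⟩ := p
    simp only [lPass, pvBumpFirst]
    split <;> simp [ih]

theorem lPass_length (st : List (Int × Int)) (r : Int) :
    (lPass st r).1.length = st.length := by
  induction st generalizing r with
  | nil => rfl
  | cons p rest ih =>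
    obtain ⟨v, c⟩ := p
    simp only [lPass]
    split <;> simp [ih]

theorem lPass_map_snd (st : List (Int × Int)) (r : Int) :
    (lPass st r).1.map (·.2) = st.map (·.2) := by
  induction st generalizing r with
  | nil => rfl
  | cons p rest ih =>
    obtain ⟨v, c⟩ := p
    simp only [lPass]
    split <;> simp [ih]

-- a full pass: with enough budget every expandable entry gains exactly 1
theorem bump_full (st : List (Int × Int)) (r : Int)
    (h : (((st.filter (fun p => decide (p.1 < p.2))).length : Int)) ≤ r) :
    pvBumpFirst st r = st.map (fun p => if p.1 < p.2 then (p.1 + 1, p.2) else p) := by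
  induction st generalizing r with
  | nil => rfl
  | cons p rest ih =>
    obtain ⟨v, c⟩ := p
    simp only [List.filter_cons, decide_eq_true_eq] at h
    by_cases hvc : v < c
    · rw [if_pos hvc] at h
      simp only [List.length_cons] at h
      push_cast at h
      simp only [pvBumpFirst, List.map_cons]
      split
      · simp [hvc, ih (r - 1) (by omega)]
      · rename_i hcond
        exact absurd (show 0 < r ∧ v < c from ⟨by omega, hvc⟩) (by simpa using hcond)
    · rw [if_neg hvc] at h
      simp only [pvBumpFirst, List.map_cons]
      split
      · rename_i hcond
        exact absurd hcond (by simp [hvc])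
      · simp [hvc, ih r h]

-- bulk rounds
def addMap (k : Int) (st : List (Int × Int)) : List (Int × Int) :=
  st.map (fun p => if p.1 < p.2 then (p.1 + k, p.2) else p)

theorem addMap_zero (st : List (Int × Int)) : addMap 0 st = st := by
  unfold addMap
  conv_rhs => rw [← List.map_id st]
  apply List.map_congr_left
  intro p _
  split <;> simp

theorem addMap_addMap (st : List (Int × Int)) (j k : Int)
    (h : ∀ p ∈ st, p.1 < p.2 → p.1 + k ≤ p.2) (hjk : j < k) :
    addMap 1 (addMap j st) = addMap (j + 1) st := by
  unfold addMap
  rw [List.map_map]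
  apply List.map_congr_left
  intro p hp
  simp only [Function.comp_apply]
  by_cases hvc : p.1 < p.2
  · have h2 := h p hp hvc
    rw [if_pos hvc, if_pos (show p.1 + j < p.2 by omega), if_pos hvc, add_assoc]
  · rw [if_neg hvc, if_neg hvc, if_neg hvc]

theorem filter_addMap (st : List (Int × Int)) (j k : Int)
    (h : ∀ p ∈ st, p.1 < p.2 → p.1 + k ≤ p.2) (hjk : j < k) :
    ((addMap j st).filter (fun p => decide (p.1 < p.2))).length
      = (st.filter (fun p => decide (p.1 < p.2))).length := by
  unfold addMap
  rw [List.filter_map, List.length_map]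
  congr 1
  apply List.filter_congr
  intro p hp
  simp only [Function.comp_apply]
  by_cases hvc : p.1 < p.2
  · have h2 := h p hp hvc
    rw [if_pos hvc]
    simp only [decide_eq_true hvc, decide_eq_true (show p.1 + j < p.2 by omega)]
  · rw [if_neg hvc]

theorem lLoop_addMap (st : List (Int × Int)) (r k : Int)
    (h : ∀ p ∈ st, p.1 < p.2 → p.1 + k ≤ p.2)
    (hr : k * ((st.filter (fun p => decide (p.1 < p.2))).length : Int) ≤ r)
    (hE : 0 < ((st.filter (fun p => decide (p.1 < p.2))).length : Int)) :
    ∀ j : Nat, (j : Int) ≤ k →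
      lLoop st r = lLoop (addMap (j : Int) st)
        (r - (j : Int) * ((st.filter (fun p => decide (p.1 < p.2))).length : Int)) := by
  intro j
  induction j with
  | zero => intro _; simp [addMap_zero]
  | succ j ih =>
    intro hj1
    push_cast at hj1
    have hj : (j : Int) ≤ k := by omega
    have hjk : (j : Int) < k := by omega
    rw [ih (by exact_mod_cast hj)]
    have hjE : ((j : Int) + 1) * ((st.filter (fun p => decide (p.1 < p.2))).length : Int)
        ≤ k * ((st.filter (fun p => decide (p.1 < p.2))).length : Int) :=
      mul_le_mul_of_nonneg_right (by omega) (by omega)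
    have hr0 : 0 < r - (j : Int) * ((st.filter (fun p => decide (p.1 < p.2))).length : Int) := by
      nlinarith
    have hfE : ((addMap (j : Int) st).filter (fun p => decide (p.1 < p.2))).length
        = (st.filter (fun p => decide (p.1 < p.2))).length :=
      filter_addMap st (j : Int) k h hjk
    rw [lLoop_step _ _ hr0 (by rw [hfE]; omega)]
    have hbump : (lPass (addMap (j : Int) st)
        (r - (j : Int) * ((st.filter (fun p => decide (p.1 < p.2))).length : Int))).1
        = addMap ((j : Int) + 1) st := by
      rw [lPass_fst_eq_bump, bump_full _ _ (by rw [hfE]; nlinarith)]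
      show addMap 1 (addMap (j : Int) st) = _
      exact addMap_addMap st (j : Int) k h hjk
    have hsnd : (lPass (addMap (j : Int) st)
        (r - (j : Int) * ((st.filter (fun p => decide (p.1 < p.2))).length : Int))).2
        = r - ((j : Int) + 1) * ((st.filter (fun p => decide (p.1 < p.2))).length : Int) := by
      rw [lPass_snd, hfE]
      have h1 : ((st.filter (fun p => decide (p.1 < p.2))).length : Int)
          ≤ r - (j : Int) * ((st.filter (fun p => decide (p.1 < p.2))).length : Int) := by
        nlinarith
      have hmul : ((j : Int) + 1) * ((st.filter (fun p => decide (p.1 < p.2))).length : Int)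
          = (j : Int) * ((st.filter (fun p => decide (p.1 < p.2))).length : Int)
            + ((st.filter (fun p => decide (p.1 < p.2))).length : Int) := by ring
      omega
    rw [hbump, hsnd]
    have : ((j : Int) + 1) = ((j + 1 : Nat) : Int) := by push_cast; ring
    rw [this]

-- the minimum headroom is attained and bounds every headroom
theorem minD_facts (st : List (Int × Int))
    (hne : st.filter (fun p => decide (p.1 < p.2)) ≠ []) :
    (1 ≤ PySem.List.minD ((st.filter (fun p => decide (p.1 < p.2))).map (fun p => p.2 - p.1))
        (fun x => x) 0) ∧
    (∀ p ∈ st, p.1 < p.2 →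
      PySem.List.minD ((st.filter (fun p => decide (p.1 < p.2))).map (fun p => p.2 - p.1))
        (fun x => x) 0 ≤ p.2 - p.1) := by
  have hne2 : (st.filter (fun p => decide (p.1 < p.2))).map (fun p => p.2 - p.1) ≠ [] := by
    simpa using hne
  have hm := PySem.List.min?_eq_some_minD ((st.filter (fun p => decide (p.1 < p.2))).map
    (fun p => p.2 - p.1)) (fun x => x) 0 hne2
  have hmem := PySem.List.min?_mem hm
  have hmin := PySem.List.min?_isMin hm
  constructor
  · obtain ⟨p, hpf, hpm⟩ := List.mem_map.mp hmem
    have hp := (List.mem_filter.mp hpf).2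
    simp only [decide_eq_true_eq] at hp
    omega
  · intro p hp hvc
    exact hmin _ (List.mem_map.mpr ⟨p, List.mem_filter.mpr ⟨hp, by simp [hvc]⟩, rfl⟩)

-- CORE: the one-unit-per-pass loop equals the bulk water-filling loop
theorem lLoop_eq_pvBLoop_aux : ∀ (n : Nat) (st : List (Int × Int)) (r : Int), r.toNat ≤ n →
    lLoop st r = pvBLoop st r := by
  intro n
  induction n with
  | zero =>
    intro st r hr
    have h0 : ¬ 0 < r := by omega
    rw [lLoop_neg st r h0, pvBLoop_neg st r h0]
  | succ n ih =>
    intro st r hr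
    by_cases h0 : 0 < r
    · by_cases hn : (st.filter (fun p => decide (p.1 < p.2))).length = 0
      · rw [lLoop_done st r h0 hn, pvBLoop_done st r h0 (by simp only [pvNexp, hn]; rfl)]
      · have hfne : st.filter (fun p => decide (p.1 < p.2)) ≠ [] := by
          intro hc; rw [hc] at hn; simp at hn
        have hE : 0 < ((st.filter (fun p => decide (p.1 < p.2))).length : Int) := by
          have : 0 < (st.filter (fun p => decide (p.1 < p.2))).length := Nat.pos_of_ne_zero hn
          omega
        have hNexp : pvNexp st = ((st.filter (fun p => decide (p.1 < p.2))).length : Int) := rfl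
        have hNne : ¬ pvNexp st = 0 := by omega
        obtain ⟨hm1, hmle⟩ := minD_facts st hfne
        have hMeq : pvM st = PySem.List.minD ((st.filter (fun p => decide (p.1 < p.2))).map
            (fun p => p.2 - p.1)) (fun x => x) 0 := rfl
        by_cases hk : 1 ≤ pvK st r
        · -- bulk round
          have hkm : pvK st r ≤ pvM st := min_le_left _ _
          have hkfd : pvK st r ≤ PySem.Int.floordiv r (pvNexp st) := min_le_right _ _
          have hkE : pvK st r * ((st.filter (fun p => decide (p.1 < p.2))).length : Int) ≤ r := by
            rw [← hNexp]
            exact (PySem.Int.le_floordiv_iff_mul_le (by omega)).mp hkfd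
          have hhead : ∀ p ∈ st, p.1 < p.2 → p.1 + pvK st r ≤ p.2 := by
            intro p hp hvc
            have h3 := hmle p hp hvc
            rw [hMeq] at hkm
            omega
          have hL := lLoop_addMap st r (pvK st r) hhead hkE hE (pvK st r).toNat
            (by omega)
          rw [Int.toNat_of_nonneg (by omega : (0:Int) ≤ pvK st r)] at hL
          rw [hL, pvBLoop_bulk st r h0 hNne hk]
          show lLoop (addMap (pvK st r) st) _ = pvBLoop (addMap (pvK st r) st) _
          rw [← hNexp]
          apply ih
          have h1E : (1 : Int) * 1 ≤ pvK st r * pvNexp st :=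
            mul_le_mul hk (by omega) (by omega) (by omega)
          have hkE' : pvK st r * pvNexp st ≤ r := by rw [hNexp]; exact hkE
          omega
        · -- final partial pass: r < number of expandable entries
          have hm1' : 1 ≤ pvM st := by rw [hMeq]; exact hm1
          have hfd : PySem.Int.floordiv r (pvNexp st) < 1 := by
            by_contra hcon
            push_neg at hcon
            exact hk (le_min hm1' hcon)
          have hrE : r < pvNexp st := by
            have := (PySem.Int.floordiv_lt_iff_lt_mul
              (show 0 < pvNexp st by omega)).mp hfd
            omega
          rw [lLoop_step st r h0 hn, pvBLoop_partial st r h0 hNne hk]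
          have hsnd : (lPass st r).2 = 0 := by
            rw [lPass_snd]
            rw [hNexp] at hrE
            omega
          rw [hsnd, lPass_fst_eq_bump]
          rw [lLoop_neg _ 0 (by omega), pvBLoop_neg _ 0 (by omega)]
    · rw [lLoop_neg st r h0, pvBLoop_neg st r h0]

theorem lLoop_eq_pvBLoop (st : List (Int × Int)) (r : Int) : lLoop st r = pvBLoop st r :=
  lLoop_eq_pvBLoop_aux r.toNat st r (le_refl _)

-- ===== dict-to-list simulation for A =====

theorem getD_mk_cons_self (s : Int) (w : Int) (items : List (Int × Int)) :
    (PySem.Dict.mk ((s, w) :: items)).getD s 0 = w := by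
  simp [PySem.Dict.getD, PySem.Dict.get?_mk_cons]

theorem getD_mk_cons_ne (s s' : Int) (w : Int) (items : List (Int × Int)) (h : s' ≠ s) :
    (PySem.Dict.mk ((s, w) :: items)).getD s' 0 = (PySem.Dict.mk items).getD s' 0 := by
  have hbeq : (s == s') = false := beq_eq_false_iff_ne.mpr (Ne.symm h)
  simp [PySem.Dict.getD, PySem.Dict.get?_mk_cons, hbeq]

theorem insert_mk_cons_ne (s s1 : Int) (w x : Int) (items : List (Int × Int)) (h : s1 ≠ s) :
    (PySem.Dict.mk ((s, w) :: items)).insert s1 x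
      = PySem.Dict.mk ((s, w) :: ((PySem.Dict.mk items).insert s1 x).items) := by
  have hbeq : (s == s1) = false := beq_eq_false_iff_ne.mpr (Ne.symm h)
  simp only [PySem.Dict.insert, PySem.Dict.contains_mk, List.any_cons, hbeq, Bool.false_or]
  by_cases hc : (items.any fun p => p.1 == s1) = true
  · rw [if_pos hc, if_pos hc]
    congr 1
    simp only [List.map_cons]
    rw [if_neg (by simp [hbeq])]
  · rw [if_neg hc, if_neg hc]
    rfl

theorem insert_mk_cons_self (s : Int) (w x : Int) (items : List (Int × Int))
    (h : ∀ p ∈ items, p.1 ≠ s) :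
    (PySem.Dict.mk ((s, w) :: items)).insert s x = PySem.Dict.mk ((s, x) :: items) := by
  have hc : (PySem.Dict.mk ((s, w) :: items)).contains s = true := by
    simp [PySem.Dict.contains_mk]
  have hmap : ∀ l : List (Int × Int), (∀ p ∈ l, p.1 ≠ s) →
      List.map (fun p => if (p.1 == s) = true then (s, x) else p) l = l := by
    intro l hl
    induction l with
    | nil => rfl
    | cons q qs ih =>
      simp only [List.map_cons]
      rw [if_neg (by simp [hl q (by simp)]), ih (fun p hp => hl p (by simp [hp]))]
  simp only [PySem.Dict.insert]
  rw [if_pos hc]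
  congr 1
  simp only [List.map_cons]
  rw [if_pos (by simp), hmap items h]

-- aPass on a dict whose head key is outside the expandable list leaves the head alone
theorem pvAPass_skip (exp : List Int) (s : Int) (w : Int) (items : List (Int × Int)) (r : Int)
    (h : s ∉ exp) :
    pvAPass exp (PySem.Dict.mk ((s, w) :: items)) r
      = (PySem.Dict.mk ((s, w) :: (pvAPass exp (PySem.Dict.mk items) r).1.items),
         (pvAPass exp (PySem.Dict.mk items) r).2) := by
  induction exp generalizing items r with
  | nil => rfl
  | cons s1 ss ih =>
    have hne : s1 ≠ s := by
      intro hc; exact h (by simp [hc])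
    have hss : s ∉ ss := by
      intro hc; exact h (by simp [hc])
    by_cases hr : r ≤ 0
    · simp only [pvAPass, if_pos hr]
    · simp only [pvAPass, if_neg hr]
      rw [getD_mk_cons_ne s s1 w items hne, insert_mk_cons_ne s s1 w _ items hne]
      exact ih _ _ hss

-- the expandable list of A corresponds to the filtered list state
theorem filter_sim (cD : PySem.Dict Int Int) :
    ∀ (sizes : List Int), sizes.Nodup → ∀ (st : List (Int × Int)) (d : PySem.Dict Int Int),
      st.length = sizes.length →
      st.map (·.2) = sizes.map (fun s => cD.getD s 0) →
      d.items = sizes.zip (st.map (·.1)) →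
      (sizes.filter (fun s => decide (d.getD s 0 < cD.getD s 0))).length
        = (st.filter (fun p => decide (p.1 < p.2))).length := by
  intro sizes hnd
  induction sizes with
  | nil =>
    intro st d hlen _ _
    have : st = [] := List.length_eq_zero_iff.mp (by simpa using hlen)
    simp [this]
  | cons s ss ih =>
    intro st d hlen hsnd hd
    obtain ⟨p, st', rfl⟩ : ∃ p st', st = p :: st' := by
      cases st with
      | nil => simp at hlen
      | cons a b => exact ⟨a, b, rfl⟩
    obtain ⟨v, c⟩ := p
    have hsn : s ∉ ss := (List.nodup_cons.mp hnd).1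
    have hnd' : ss.Nodup := (List.nodup_cons.mp hnd).2
    simp only [List.map_cons, List.zip_cons_cons] at hd hsnd
    obtain ⟨hceq, hsnd'⟩ := List.cons_eq_cons.mp hsnd
    obtain rfl : d = PySem.Dict.mk ((s, v) :: ss.zip (st'.map (·.1))) := PySem.Dict.ext hd
    have hgd : (PySem.Dict.mk ((s, v) :: ss.zip (st'.map (·.1)))).getD s 0 = v :=
      getD_mk_cons_self s v _
    have hfe : ss.filter (fun s' => decide ((PySem.Dict.mk ((s, v) :: ss.zip (st'.map (·.1)))).getD s' 0 < cD.getD s' 0))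
        = ss.filter (fun s' => decide ((PySem.Dict.mk (ss.zip (st'.map (·.1)))).getD s' 0 < cD.getD s' 0)) := by
      apply List.filter_congr
      intro s' hs'
      rw [getD_mk_cons_ne s s' v _ (by intro hc; exact hsn (hc ▸ hs'))]
    have hih := ih hnd' st' (PySem.Dict.mk (ss.zip (st'.map (·.1)))) (by simpa using hlen)
      hsnd' rfl
    simp only [List.filter_cons, hgd, hceq, decide_eq_true_eq, hfe]
    by_cases hvc : v < cD.getD s 0
    · rw [if_pos hvc, if_pos hvc, List.length_cons, List.length_cons, hih]
    · rw [if_neg hvc, if_neg hvc, hih]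

-- one pass of A on the dict = one pass on the list state
theorem pass_sim (cD : PySem.Dict Int Int) :
    ∀ (sizes : List Int), sizes.Nodup → ∀ (st : List (Int × Int)) (d : PySem.Dict Int Int) (r : Int),
      st.length = sizes.length →
      st.map (·.2) = sizes.map (fun s => cD.getD s 0) →
      d.items = sizes.zip (st.map (·.1)) →
      (pvAPass (sizes.filter (fun s => decide (d.getD s 0 < cD.getD s 0))) d r).1.items
          = sizes.zip ((lPass st r).1.map (·.1)) ∧
      (pvAPass (sizes.filter (fun s => decide (d.getD s 0 < cD.getD s 0))) d r).2
          = (lPass st r).2 := by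
  intro sizes hnd
  induction sizes with
  | nil =>
    intro st d r hlen _ hd
    have : st = [] := List.length_eq_zero_iff.mp (by simpa using hlen)
    subst this
    refine ⟨?_, rfl⟩
    simpa [pvAPass, lPass] using hd
  | cons s ss ih =>
    intro st d r hlen hsnd hd
    obtain ⟨p, st', rfl⟩ : ∃ p st', st = p :: st' := by
      cases st with
      | nil => simp at hlen
      | cons a b => exact ⟨a, b, rfl⟩
    obtain ⟨v, c⟩ := p
    have hsn : s ∉ ss := (List.nodup_cons.mp hnd).1
    have hnd' : ss.Nodup := (List.nodup_cons.mp hnd).2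
    simp only [List.map_cons, List.zip_cons_cons] at hd hsnd
    obtain ⟨hceq, hsnd'⟩ := List.cons_eq_cons.mp hsnd
    obtain rfl : d = PySem.Dict.mk ((s, v) :: ss.zip (st'.map (·.1))) := PySem.Dict.ext hd
    have hkeys : ∀ q ∈ ss.zip (st'.map (·.1)), q.1 ≠ s := by
      intro q hq hc
      exact hsn (hc ▸ (List.of_mem_zip hq).1)
    have hgd : (PySem.Dict.mk ((s, v) :: ss.zip (st'.map (·.1)))).getD s 0 = v :=
      getD_mk_cons_self s v _
    have hfe : ss.filter (fun s' => decide ((PySem.Dict.mk ((s, v) :: ss.zip (st'.map (·.1)))).getD s' 0 < cD.getD s' 0))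
        = ss.filter (fun s' => decide ((PySem.Dict.mk (ss.zip (st'.map (·.1)))).getD s' 0 < cD.getD s' 0)) := by
      apply List.filter_congr
      intro s' hs'
      rw [getD_mk_cons_ne s s' v _ (by intro hc; exact hsn (hc ▸ hs'))]
    have hexpss : s ∉ ss.filter (fun s' => decide ((PySem.Dict.mk (ss.zip (st'.map (·.1)))).getD s' 0 < cD.getD s' 0)) :=
      fun hc => hsn (List.mem_of_mem_filter hc)
    simp only [List.filter_cons, hgd, hceq, decide_eq_true_eq, hfe]
    by_cases hvc : v < cD.getD s 0
    · rw [if_pos hvc]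
      by_cases hr : 0 < r
      · -- head gets an increment
        simp only [pvAPass, if_neg (show ¬ r ≤ 0 by omega), hgd]
        rw [insert_mk_cons_self s v (v + 1) _ hkeys]
        rw [pvAPass_skip _ s (v + 1) _ _ hexpss]
        have hih := ih hnd' st' (PySem.Dict.mk (ss.zip (st'.map (·.1)))) (r - 1)
          (by simpa using hlen) hsnd' rfl
        simp only [lPass, if_pos (show 0 < r ∧ v < cD.getD s 0 from ⟨hr, hvc⟩),
          List.map_cons, List.zip_cons_cons]
        exact ⟨by rw [← hih.1], hih.2⟩
      · -- remaining exhausted: nothing changes on either side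
        have hstop : pvAPass (s :: ss.filter (fun s' => decide ((PySem.Dict.mk (ss.zip (st'.map (·.1)))).getD s' 0 < cD.getD s' 0)))
            (PySem.Dict.mk ((s, v) :: ss.zip (st'.map (·.1)))) r
            = (PySem.Dict.mk ((s, v) :: ss.zip (st'.map (·.1))), r) := by
          simp only [pvAPass, if_pos (show r ≤ 0 by omega)]
        rw [hstop, lPass_nonpos _ r (by omega)]
        constructor
        · simp
        · rfl
    · -- head not expandable
      rw [if_neg hvc]
      rw [pvAPass_skip _ s v _ _ hexpss]
      have hih := ih hnd' st' (PySem.Dict.mk (ss.zip (st'.map (·.1)))) r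
        (by simpa using hlen) hsnd' rfl
      simp only [lPass, if_neg (show ¬ (0 < r ∧ v < cD.getD s 0) by tauto),
        List.map_cons, List.zip_cons_cons]
      exact ⟨by rw [← hih.1], hih.2⟩

-- the whole while-loop of A on the dict = lLoop on the list state
theorem loop_sim (cD : PySem.Dict Int Int) (sizes : List Int) (hnd : sizes.Nodup)
    (st : List (Int × Int)) (d : PySem.Dict Int Int) (r : Int)
    (hlen : st.length = sizes.length)
    (hsnd : st.map (·.2) = sizes.map (fun s => cD.getD s 0))
    (hd : d.items = sizes.zip (st.map (·.1))) :
    (pvALoop sizes cD d r).items = sizes.zip ((lLoop st r).map (·.1)) := by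
  have main : ∀ (n : Nat) (st : List (Int × Int)) (d : PySem.Dict Int Int) (r : Int), r.toNat ≤ n →
      st.length = sizes.length →
      st.map (·.2) = sizes.map (fun s => cD.getD s 0) →
      d.items = sizes.zip (st.map (·.1)) →
      (pvALoop sizes cD d r).items = sizes.zip ((lLoop st r).map (·.1)) := by
    intro n
    induction n with
    | zero =>
      intro st d r hrn hlen hsnd hd
      have h0 : ¬ 0 < r := by omega
      rw [pvALoop_neg _ _ _ _ h0, lLoop_neg _ _ h0, hd]
    | succ n ih =>
      intro st d r hrn hlen hsnd hd
      by_cases h0 : 0 < r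
      · have hfl := filter_sim cD sizes hnd st d hlen hsnd hd
        have hexp : pvExpandable sizes cD d
            = sizes.filter (fun s => decide (d.getD s 0 < cD.getD s 0)) := rfl
        by_cases hx : sizes.filter (fun s => decide (d.getD s 0 < cD.getD s 0)) = []
        · have hnl : (st.filter (fun p => decide (p.1 < p.2))).length = 0 := by
            rw [← hfl, hx]; rfl
          rw [pvALoop_done _ _ _ _ h0 (by rw [hexp]; exact hx), lLoop_done _ _ h0 hnl, hd]
        · have hnl : ¬ (st.filter (fun p => decide (p.1 < p.2))).length = 0 := by
            rw [← hfl]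
            simpa [List.length_eq_zero_iff] using hx
          rw [pvALoop_step _ _ _ _ h0 (by rw [hexp]; exact hx), lLoop_step _ _ h0 hnl]
          obtain ⟨hps1, hps2⟩ := pass_sim cD sizes hnd st d r hlen hsnd hd
          rw [hexp, hps2]
          apply ih
          · have hlt := pvAPass_snd_lt (sizes.filter (fun s => decide (d.getD s 0 < cD.getD s 0)))
              d r hx h0
            rw [hps2] at hlt
            omega
          · rw [lPass_length]; exact hlen
          · rw [lPass_map_snd]; exact hsnd
          · exact hps1
      · rw [pvALoop_neg _ _ _ _ h0, lLoop_neg _ _ h0, hd]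
  exact main r.toNat st d r (le_refl _) hlen hsnd hd

-- initial-state lemma for B's for-loop
theorem bInit_eq (tD cD : PySem.Dict Int Int) (sizes : List Int) :
    sizes.foldl (fun (acc : List (Int × Int) × Int) s =>
      let t := tD.getD s 0
      let c := cD.getD s 0
      let v := min t c
      (acc.1 ++ [(v, c)], acc.2 + (t - v))) ([], 0)
    = (sizes.map (fun s => (min (tD.getD s 0) (cD.getD s 0), cD.getD s 0)),
       (sizes.map (fun s => tD.getD s 0 - min (tD.getD s 0) (cD.getD s 0))).sum) := by
  have gen : ∀ (sizes : List Int) (l0 : List (Int × Int)) (r0 : Int),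
      sizes.foldl (fun (acc : List (Int × Int) × Int) s =>
        let t := tD.getD s 0
        let c := cD.getD s 0
        let v := min t c
        (acc.1 ++ [(v, c)], acc.2 + (t - v))) (l0, r0)
      = (l0 ++ sizes.map (fun s => (min (tD.getD s 0) (cD.getD s 0), cD.getD s 0)),
         r0 + (sizes.map (fun s => tD.getD s 0 - min (tD.getD s 0) (cD.getD s 0))).sum) := by
    intro sizes
    induction sizes with
    | nil => intro l0 r0; simp
    | cons s ss ih =>
      intro l0 r0
      simp only [List.foldl_cons, ih, List.map_cons, List.sum_cons]
      refine congrArg₂ Prod.mk ?_ (by ring)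
      simp
  simpa using gen sizes [] 0

theorem zip_self_map {α β : Type} (l : List α) (f : α → β) :
    l.zip (l.map f) = l.map (fun x => (x, f x)) := by
  induction l with
  | nil => rfl
  | cons x xs ih => simp [ih]

theorem sum_map_sub (l : List Int) (f g : Int → Int) :
    (l.map (fun s => f s - g s)).sum = (l.map f).sum - (l.map g).sum := by
  induction l with
  | nil => simp
  | cons x xs ih => simp [ih]; ring

-- ===== VERDICT (by name: the statement is the Claim_ definition above) =====
theorem clip_targets_and_redistribute_py_spec : Claim_equal_clip_targets_and_redistribute_py := by
  unfold Claim_equal_clip_targets_and_redistribute_py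
  intro target_by_size cap_by_size _
  unfold Spec_clip_targets_and_redistribute_py
  unfold clip_targets_and_redistribute_py clip_targets_and_redistribute_py_alt
  simp only []
  set tD := PySem.Dict.ofList target_by_size with htD
  set cD := PySem.Dict.ofList cap_by_size with hcD
  set sizes := PySem.List.sorted tD.keys (fun s => s) false with hsizes
  set tf : Int → Int := fun s => tD.getD s 0 with htf
  set cf : Int → Int := fun s => cD.getD s 0 with hcf
  set vf : Int → Int := fun s => min (tf s) (cf s) with hvf
  have hnd : sizes.Nodup := by
    rw [hsizes]
    exact ((PySem.List.sorted_perm tD.keys (fun s => s) false).nodup_iff).mpr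
      (PySem.Dict.nodup_keys_ofList target_by_size)
  have hout : (sizes.foldl (fun d s => d.insert s (min (tD.getD s 0) (cD.getD s 0)))
      PySem.Dict.empty).items = sizes.map (fun s => (s, vf s)) := by
    rw [PySem.Dict.items_foldl_insert_fresh sizes (fun s => s)
      (fun s => min (tD.getD s 0) (cD.getD s 0)) PySem.Dict.empty
      (fun a _ => PySem.Dict.contains_empty a) (by simpa using hnd)]
    show PySem.Dict.empty.items ++ _ = _
    simp only [PySem.Dict.empty, List.nil_append]
    rfl
  have hvals : (sizes.foldl (fun d s => d.insert s (min (tD.getD s 0) (cD.getD s 0)))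
      PySem.Dict.empty).values = sizes.map vf := by
    show ((sizes.foldl (fun d s => d.insert s (min (tD.getD s 0) (cD.getD s 0)))
      PySem.Dict.empty).items).map (·.2) = _
    rw [hout, List.map_map]
    rfl
  have hrem : max 0 ((sizes.map (fun s => tD.getD s 0)).sum
      - (sizes.foldl (fun d s => d.insert s (min (tD.getD s 0) (cD.getD s 0)))
          PySem.Dict.empty).values.sum)
      = (sizes.map (fun s => tf s - vf s)).sum := by
    rw [hvals]
    have h1 : (sizes.map (fun s => tf s - vf s)).sum
        = (sizes.map tf).sum - (sizes.map vf).sum := sum_map_sub sizes tf vf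
    have h2 : 0 ≤ (sizes.map (fun s => tf s - vf s)).sum := by
      apply List.sum_nonneg
      intro x hx
      obtain ⟨s, _, rfl⟩ := List.mem_map.mp hx
      simp [hvf]
    have h3 : (sizes.map (fun s => tD.getD s 0)).sum = (sizes.map tf).sum := rfl
    omega
  rw [hrem]
  rw [bInit_eq tD cD sizes]
  have hRB : (sizes.map (fun s => tD.getD s 0 - min (tD.getD s 0) (cD.getD s 0))).sum
      = (sizes.map (fun s => tf s - vf s)).sum := rfl
  have hst0B : sizes.map (fun s => (min (tD.getD s 0) (cD.getD s 0), cD.getD s 0))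
      = sizes.map (fun s => (vf s, cf s)) := rfl
  rw [hRB, hst0B]
  have hsim := loop_sim cD sizes hnd (sizes.map (fun s => (vf s, cf s)))
    (sizes.foldl (fun d s => d.insert s (min (tD.getD s 0) (cD.getD s 0))) PySem.Dict.empty)
    ((sizes.map (fun s => tf s - vf s)).sum)
    (by simp) (by rw [List.map_map]; rfl)
    (by rw [hout, List.map_map]
        have hcomp : ((fun p : Int × Int => p.2) ∘ fun s => (vf s, cf s)) = cf := rfl
        rw [show ((·.1) ∘ fun s => (vf s, cf s)) = vf from rfl, ← zip_self_map])
  rw [hsim, lLoop_eq_pvBLoop]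
  rw [List.zip_map_right]
  apply List.map_congr_left
  intro p _
  rfl
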